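-- pv_equiv track=rewrite | github.com/yaotoon0326/hcollector_ana | app.py | get_col_bounds
-- ===== SOURCE A (Python) =====
-- def get_col_bounds(sep_line: str):
--     """从分隔符行提取列边界 [(start, end), ...]"""
--     cols = []
--     in_dash = False
--     start = 0
--     for i, c in enumerate(sep_line + ' '):
--         if c == '-' and not in_dash:
--             start = i
--             in_dash = True
--         elif c != '-' and in_dash:
--             cols.append((start, i))
--             in_dash = False
--     return cols
-- ===== SOURCE B (Python) =====
-- import re
--
-- def get_col_bounds(sep_line: str):
--     """从分隔符行提取列边界 [(start, end), ...]"""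
--     return [(m.start(), m.end()) for m in re.finditer(r'-+', sep_line)]
-- ===== Notes on version B (the rewrite author's own statement) =====
-- stated objective: faster
-- what changed: Replaces the explicit in_dash/start state machine with its trailing-space sentinel by a regex scan over maximal dash runs (re.finditer(r'-+')), emitting each match's (start, end) directly; the C-level regex engine removes the per-character Python loop.
import Mathlib
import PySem

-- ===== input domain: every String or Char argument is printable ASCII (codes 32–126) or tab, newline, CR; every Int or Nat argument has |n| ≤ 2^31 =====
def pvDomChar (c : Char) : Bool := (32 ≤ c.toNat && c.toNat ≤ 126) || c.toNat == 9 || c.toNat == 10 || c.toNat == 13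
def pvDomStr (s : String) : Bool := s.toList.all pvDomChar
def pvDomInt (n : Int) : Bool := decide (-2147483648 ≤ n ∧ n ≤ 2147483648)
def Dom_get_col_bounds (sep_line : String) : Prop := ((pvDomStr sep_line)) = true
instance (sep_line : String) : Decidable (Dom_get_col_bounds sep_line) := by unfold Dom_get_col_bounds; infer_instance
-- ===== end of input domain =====

-- B replaces A's in_dash/start state machine (with its trailing-space sentinel) by a regex
-- scan over maximal dash runs (re.finditer(r'-+')), emitting each match's (start, end); idiomatic, measurably faster (C-level regex scan vs per-char Python loop).

-- ===== PORT A =====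
-- loop body of A's 'for i, c in enumerate(sep_line + " ")' over state (cols, in_dash, start)
def gcbStepA (st : List (Int × Int) × Bool × Int) (ic : Int × Char) :
    List (Int × Int) × Bool × Int :=
  if ic.2 == '-' && !st.2.1 then (st.1, true, ic.1)
  else if ic.2 != '-' && st.2.1 then (st.1 ++ [(st.2.2, ic.1)], false, st.2.2)
  else st

def get_col_bounds (sep_line : String) : List (Int × Int) :=
  ((PySem.List.enumerate (sep_line.toList ++ [' ']) 0).foldl gcbStepA ([], false, 0)).1

-- ===== PORT B =====
-- Hand port of re.finditer(r'-+', sep_line): scan for the next '-'; a match is that dash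
-- together with the following maximal dash run (takeWhile); continue after the run.
-- Exact: finditer over '-+' yields exactly the maximal dash runs, left to right, as (start, end).
def gcbRuns : List Char → Int → List (Int × Int)
  | [], _ => []
  | c :: rest, i =>
    if c == '-' then
      let k := (rest.takeWhile (fun d => d == '-')).length
      (i, i + 1 + k) :: gcbRuns (rest.drop k) (i + 1 + k)
    else gcbRuns rest (i + 1)
  termination_by cs => cs.length
  decreasing_by
    · exact Nat.lt_succ_of_le (by simp)
    · simp

def get_col_bounds_alt (sep_line : String) : List (Int × Int) :=
  gcbRuns sep_line.toList 0

-- ===== PRECONDITION & SPEC =====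
def Spec_get_col_bounds (sep_line : String) (out : List (Int × Int)) : Prop := out = get_col_bounds_alt sep_line
instance (sep_line : String) (out : List (Int × Int)) : Decidable (Spec_get_col_bounds sep_line out) := by unfold Spec_get_col_bounds; infer_instance

-- ===== CLAIM (what is proved, stated in full; the proofs are below) =====
def Claim_equal_get_col_bounds : Prop := ∀ (sep_line : String), Dom_get_col_bounds sep_line → Spec_get_col_bounds sep_line (get_col_bounds sep_line)

-- ===== LEMMAS AND PROOFS =====

-- one-step unfoldings of B's run scanner
theorem gcbRuns_dash (rest : List Char) (i : Int) :
    gcbRuns ('-' :: rest) i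
      = (i, i + 1 + ((rest.takeWhile (fun d => d == '-')).length : Int))
          :: gcbRuns (rest.drop (rest.takeWhile (fun d => d == '-')).length)
               (i + 1 + ((rest.takeWhile (fun d => d == '-')).length : Int)) := by
  simp [gcbRuns]

theorem gcbRuns_nondash {c : Char} (hc : c ≠ '-') (rest : List Char) (i : Int) :
    gcbRuns (c :: rest) i = gcbRuns rest (i + 1) := by
  simp [gcbRuns, hc]

-- Invariant of A's loop, both dash states at once, by strong induction on the remaining input.
theorem gcb_fold_inv : ∀ (n : Nat) (cs : List Char), cs.length = n →
    (∀ (i : Int) (cols : List (Int × Int)) (st : Int),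
        ((PySem.List.enumerate (cs ++ [' ']) i).foldl gcbStepA (cols, false, st)).1
          = cols ++ gcbRuns cs i) ∧
    (∀ (i : Int) (cols : List (Int × Int)) (s0 : Int),
        ((PySem.List.enumerate (cs ++ [' ']) i).foldl gcbStepA (cols, true, s0)).1
          = cols ++ (s0, i + ((cs.takeWhile (fun d => d == '-')).length : Int))
              :: gcbRuns (cs.drop (cs.takeWhile (fun d => d == '-')).length)
                   (i + ((cs.takeWhile (fun d => d == '-')).length : Int))) := by
  intro n
  induction n using Nat.strong_induction_on with
  | _ n ih =>
    intro cs hlen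
    constructor
    · intro i cols st
      match cs, hlen with
      | [], _ =>
        simp [PySem.List.enumerate_cons, PySem.List.enumerate_nil, gcbStepA, gcbRuns]
      | c :: rest, hlen =>
        simp only [List.length_cons] at hlen
        by_cases hc : c = '-'
        · subst hc
          have hrec := ((ih rest.length (by omega) rest rfl).2) (i + 1) cols i
          simp only [List.cons_append, PySem.List.enumerate_cons, List.foldl_cons]
          rw [show gcbStepA (cols, false, st) (i, '-') = (cols, true, i) from by
                simp [gcbStepA]]
          rw [hrec, gcbRuns_dash]
        · have hrec := ((ih rest.length (by omega) rest rfl).1) (i + 1) cols st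
          simp only [List.cons_append, PySem.List.enumerate_cons, List.foldl_cons]
          rw [show gcbStepA (cols, false, st) (i, c) = (cols, false, st) from by
                simp [gcbStepA, hc]]
          rw [hrec, gcbRuns_nondash hc]
    · intro i cols s0
      match cs, hlen with
      | [], _ =>
        simp [PySem.List.enumerate_cons, PySem.List.enumerate_nil, gcbStepA, gcbRuns]
      | c :: rest, hlen =>
        simp only [List.length_cons] at hlen
        by_cases hc : c = '-'
        · subst hc
          have hrec := ((ih rest.length (by omega) rest rfl).2) (i + 1) cols s0
          simp only [List.cons_append, PySem.List.enumerate_cons, List.foldl_cons]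
          rw [show gcbStepA (cols, true, s0) (i, '-') = (cols, true, s0) from by
                simp [gcbStepA]]
          rw [hrec]
          simp only [List.takeWhile_cons, beq_self_eq_true, if_true, List.length_cons,
            List.drop_succ_cons]
          push_cast
          rw [show i + (((rest.takeWhile (fun d => d == '-')).length : Int) + 1)
                = i + 1 + ((rest.takeWhile (fun d => d == '-')).length : Int) from by ring]
        · have hcb : (c == '-') = false := by simp [hc]
          have hrec := ((ih rest.length (by omega) rest rfl).1) (i + 1) (cols ++ [(s0, i)]) s0
          simp only [List.cons_append, PySem.List.enumerate_cons, List.foldl_cons]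
          rw [show gcbStepA (cols, true, s0) (i, c) = (cols ++ [(s0, i)], false, s0) from by
                simp [gcbStepA, hc]]
          rw [hrec]
          simp [hcb, gcbRuns_nondash hc]

-- ===== VERDICT (by name: the statement is the Claim_ definition above) =====
theorem get_col_bounds_spec : Claim_equal_get_col_bounds := by
  intro s _
  unfold Spec_get_col_bounds get_col_bounds get_col_bounds_alt
  rw [(gcb_fold_inv s.toList.length s.toList rfl).1 0 [] 0, List.nil_append]
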